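-- pv_equiv track=rewrite | github.com/VedantRD/Efficient-Coding-Practice | special_string.py | check_special
-- ===== SOURCE A (Python) =====
-- def check_special(str):
--     if len(str) == 1:
--         return True
--     else:
--         s = str[0]
--         # if len(str) % 2 == 1:
--         mid = len(str) // 2
--         for i in range(len(str)):
--             if str[i] != s:
--                 if len(str) % 2 == 1 and i != mid:
--                     return False
--                 elif len(str) % 2 == 0:
--                     return False
--         else:
--             return True
-- ===== SOURCE B (Python) =====
-- def check_special(str):
--     s = str[0]
--     n = len(str)
--     if n % 2 == 0:
--         return str == s * n
--     mid = n // 2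
--     return str[:mid] + str[mid+1:] == s * (n - 1)
-- ===== Notes on version B (the rewrite author's own statement) =====
-- stated objective: simpler
-- what changed: Closed-form equality tests instead of an index loop: for even length compare the whole string to s*n, for odd length compare the string with its middle character removed to s*(n-1); no per-index branching or early returns.
import Mathlib
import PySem

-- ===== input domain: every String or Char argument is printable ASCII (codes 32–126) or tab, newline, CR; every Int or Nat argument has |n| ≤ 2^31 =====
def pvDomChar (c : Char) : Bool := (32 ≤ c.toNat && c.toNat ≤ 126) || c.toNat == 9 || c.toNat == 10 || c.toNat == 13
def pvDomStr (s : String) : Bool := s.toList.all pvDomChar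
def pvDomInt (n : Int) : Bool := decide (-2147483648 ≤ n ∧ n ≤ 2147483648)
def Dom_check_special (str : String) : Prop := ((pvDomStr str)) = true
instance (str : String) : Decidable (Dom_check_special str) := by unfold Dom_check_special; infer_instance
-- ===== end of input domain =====

-- B replaces A's early-return index loop by closed-form equality tests (whole string vs s repeated; middle removed for odd length); objective: simpler.


-- ===== PORT A =====
-- A's for-loop with early returns: a diff at i returns False unless length is odd and i is the middle.
def pvALoop (cs : List Char) (s : Char) (odd : Bool) (mid : Nat) : List Nat → Bool
  | [] => true
  | i :: rest =>
    if cs.getD i ' ' != s then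
      if odd && (i != mid) then false
      else if !odd then false
      else pvALoop cs s odd mid rest
    else pvALoop cs s odd mid rest

def check_special (str : String) : Bool :=
  let cs := str.toList
  if cs.length == 1 then true
  else
    match cs with
    | [] => false  -- A raises IndexError here (str[0]); excluded by Pre_
    | s :: rest =>
      pvALoop (s :: rest) s ((s :: rest).length % 2 == 1) ((s :: rest).length / 2)
        (List.range (s :: rest).length)

-- ===== PORT B =====
def check_special_alt (str : String) : Bool :=
  match str.toList with
  | [] => false  -- B raises IndexError here (str[0]); excluded by Pre_
  | s :: rest =>
    let cs := s :: rest
    let n := cs.length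
    if n % 2 == 0 then cs == List.replicate n s
    else
      let mid := n / 2
      (cs.take mid ++ cs.drop (mid + 1)) == List.replicate (n - 1) s

-- ===== PRECONDITION & SPEC =====
-- Pre_ excludes only the empty string, on which A (and B) raise IndexError at str[0].
def Pre_check_special (str : String) : Prop := str ≠ ""
instance (str : String) : Decidable (Pre_check_special str) := by unfold Pre_check_special; infer_instance
def pvWitness_check_special : String := "aba"
def Spec_check_special (str : String) (out : Bool) : Prop := out = check_special_alt str
instance (str : String) (out : Bool) : Decidable (Spec_check_special str out) := by unfold Spec_check_special; infer_instance

-- ===== CLAIM (what is proved, stated in full; the proofs are below) =====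
def Claim_equal_check_special : Prop := ∀ (str : String), Dom_check_special str → Pre_check_special str → Spec_check_special str (check_special str)

-- ===== LEMMAS AND PROOFS =====
theorem pvALoop_eq_all (cs : List Char) (s : Char) (odd : Bool) (mid : Nat) (l : List Nat) :
    pvALoop cs s odd mid l = l.all (fun i => (cs.getD i ' ' == s) || (odd && i == mid)) := by
  induction l with
  | nil => rfl
  | cons i rest ih =>
    by_cases hd : cs[i]?.getD ' ' = s
    · have h1 : (cs.getD i ' ' != s) = false := by
        simp only [List.getD_eq_getElem?_getD]; simp [hd]
      have h2 : (cs.getD i ' ' == s) = true := by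
        simp only [List.getD_eq_getElem?_getD]; simp [hd]
      simp only [pvALoop, h1, Bool.false_eq_true, if_false, List.all_cons, h2, Bool.true_or,
        Bool.true_and, ih]
    · have h1 : (cs.getD i ' ' != s) = true := by
        simp only [List.getD_eq_getElem?_getD]; simp [hd]
      have h2 : (cs.getD i ' ' == s) = false := by
        simp only [List.getD_eq_getElem?_getD]; simp [hd]
      simp only [pvALoop, h1, if_true, List.all_cons, h2, Bool.false_or, ih]
      cases odd
      · simp
      · by_cases hm : i = mid <;> simp [hm]

-- even case: all positions equal s  ↔  cs = replicate n s
theorem pv_even_case (cs : List Char) (s : Char) :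
    ((List.range cs.length).all (fun i => cs.getD i ' ' == s)) = (cs == List.replicate cs.length s) := by
  rw [Bool.eq_iff_iff]
  simp only [List.all_eq_true, List.mem_range, beq_iff_eq, List.eq_replicate_iff]
  constructor
  · intro h
    refine ⟨by simp, fun x hx => ?_⟩
    obtain ⟨i, hi, rfl⟩ := List.mem_iff_getElem.mp hx
    have := h i hi
    rwa [List.getD_eq_getElem _ _ hi] at this
  · rintro ⟨-, h⟩ i hi
    rw [List.getD_eq_getElem _ _ hi]
    exact h _ (List.getElem_mem hi)

-- odd case: all positions except mid equal s  ↔  the string minus its middle is replicate (n-1) s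
theorem pv_odd_case (cs : List Char) (s : Char) (mid : Nat) (hmid : mid < cs.length) :
    ((List.range cs.length).all (fun i => (cs.getD i ' ' == s) || (i == mid))) =
      ((cs.take mid ++ cs.drop (mid + 1)) == List.replicate (cs.length - 1) s) := by
  rw [Bool.eq_iff_iff]
  simp only [List.all_eq_true, List.mem_range, Bool.or_eq_true, beq_iff_eq, List.eq_replicate_iff,
    List.length_append, List.length_take, List.length_drop]
  constructor
  · intro h
    refine ⟨by omega, fun x hx => ?_⟩
    rcases List.mem_append.mp hx with hx | hx
    · obtain ⟨j, hj, rfl⟩ := List.mem_iff_getElem.mp hx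
      have hjm : j < mid ∧ j < cs.length := by simpa using hj
      have hj' : j < cs.length := hjm.2
      rw [List.getElem_take]
      rcases h j hj' with hs | hm
      · rwa [List.getD_eq_getElem _ _ hj'] at hs
      · omega
    · obtain ⟨j, hj, rfl⟩ := List.mem_iff_getElem.mp hx
      have hj' : mid + 1 + j < cs.length := by simp at hj; omega
      rw [List.getElem_drop]
      rcases h (mid + 1 + j) hj' with hs | hm
      · rwa [List.getD_eq_getElem _ _ hj'] at hs
      · omega
  · rintro ⟨-, h⟩ i hi
    by_cases him : i = mid
    · exact Or.inr him
    · left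
      rw [List.getD_eq_getElem _ _ hi]
      rcases Nat.lt_or_gt_of_ne him with hlt | hgt
      · refine h _ (List.mem_append.mpr (Or.inl ?_))
        refine List.mem_iff_getElem.mpr ⟨i, by simp; omega, ?_⟩
        rw [List.getElem_take]
      · refine h _ (List.mem_append.mpr (Or.inr ?_))
        refine List.mem_iff_getElem.mpr ⟨i - (mid + 1), by simp; omega, ?_⟩
        rw [List.getElem_drop]
        congr 1
        omega

-- ===== VERDICT (by name: the statement is the Claim_ definition above) =====
theorem check_special_spec : Claim_equal_check_special := by
  intro str _ hpre
  unfold Spec_check_special check_special check_special_alt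
  have hne : str.toList ≠ [] := by
    simpa [String.toList_eq_nil_iff] using hpre
  cases hcs : str.toList with
  | nil => exact absurd hcs hne
  | cons s rest =>
    simp only
    by_cases h1 : (s :: rest).length = 1
    · cases rest with
      | nil => simp
      | cons b t => simp at h1
    · have h1' : ((s :: rest).length == 1) = false := by simpa using h1
      rw [h1']
      simp only [Bool.false_eq_true, if_false]
      simp only [List.length_cons] at h1' ⊢
      rw [pvALoop_eq_all]
      by_cases hodd : (rest.length + 1) % 2 = 1
      · have he : (((rest.length + 1) % 2 == 0)) = false := by simp; omega
        have ho : (((rest.length + 1) % 2 == 1)) = true := by simp [hodd]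
        rw [he]
        simp only [Bool.false_eq_true, if_false, ho, Bool.true_and]
        have := pv_odd_case (s :: rest) s ((rest.length + 1) / 2) (by simp; omega)
        simpa using this
      · have he : (((rest.length + 1) % 2 == 0)) = true := by simp; omega
        have ho : (((rest.length + 1) % 2 == 1)) = false := by simp [hodd]
        rw [he]
        simp only [if_true, ho, Bool.false_and, Bool.or_false]
        have := pv_even_case (s :: rest) s
        simpa using this
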